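-- pv_equiv track=rewrite | github.com/JoshL51/MazeProject | pathToCommand.py | commandFunction
-- ===== SOURCE A (Python) =====
-- def commandFunction(start, goal, path):
--     lastPosition = start
--     resetCommand = (0, 0)
--     commandLine = []
--     for positions in path:
--         if positions == goal:
--             currentPosition = positions
--             move = (currentPosition[0] - lastPosition[0], currentPosition[1] - lastPosition[1])
--             commandLine.append(move)
--             commandLine.append(resetCommand)
--             break
--         currentPosition = positions
--         move = (currentPosition[0] - lastPosition[0], currentPosition[1] - lastPosition[1])
--         commandLine.append(move)
--         lastPosition = currentPosition
--     return list(reversed(commandLine))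
-- ===== SOURCE B (Python) =====
-- def commandFunction(start, goal, path):
--     p = list(path)
--     found = goal in p
--     seq = [start] + (p[:p.index(goal) + 1] if found else p)
--     deltas = [(b[0] - a[0], b[1] - a[1]) for a, b in zip(seq, seq[1:])]
--     if found:
--         deltas.append((0, 0))
--     return list(reversed(deltas))
-- ===== Notes on version B (the rewrite author's own statement) =====
-- stated objective: alternative
-- what changed: Replaces the stateful loop with break and lastPosition accumulator by truncating the path at the first goal occurrence, a pairwise zip comprehension for the deltas, and a single conditional (0,0) append before reversing.
import Mathlib
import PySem

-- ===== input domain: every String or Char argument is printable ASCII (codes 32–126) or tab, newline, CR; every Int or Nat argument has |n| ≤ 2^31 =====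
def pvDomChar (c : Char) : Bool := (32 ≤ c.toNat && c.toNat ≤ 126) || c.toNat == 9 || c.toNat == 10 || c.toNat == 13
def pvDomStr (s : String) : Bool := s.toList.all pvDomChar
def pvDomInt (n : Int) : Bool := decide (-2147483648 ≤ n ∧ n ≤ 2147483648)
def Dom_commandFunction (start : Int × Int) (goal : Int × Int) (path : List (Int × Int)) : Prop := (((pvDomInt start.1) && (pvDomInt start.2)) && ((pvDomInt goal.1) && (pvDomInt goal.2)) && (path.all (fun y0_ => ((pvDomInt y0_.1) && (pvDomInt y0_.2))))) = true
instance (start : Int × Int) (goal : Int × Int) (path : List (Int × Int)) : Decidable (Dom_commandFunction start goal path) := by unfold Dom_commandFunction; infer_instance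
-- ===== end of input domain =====

-- B replaces A's stateful loop (lastPosition accumulator + break) by truncating the path at the
-- first goal occurrence and taking pairwise differences of consecutive positions; same cost.

-- ===== PORT A =====
-- the for-loop of A: carries lastPosition, breaks (with delta and reset appended) at the goal
def pvALoop (goal : Int × Int) (last : Int × Int) : List (Int × Int) → List (Int × Int)
  | [] => []
  | pos :: rest =>
    if pos = goal then
      [(pos.1 - last.1, pos.2 - last.2), (0, 0)]
    else
      (pos.1 - last.1, pos.2 - last.2) :: pvALoop goal pos rest

def commandFunction (start : Int × Int) (goal : Int × Int) (path : List (Int × Int)) : List (Int × Int) :=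
  (pvALoop goal start path).reverse

-- ===== PORT B =====
-- Source B's comprehension: [(b[0]-a[0], b[1]-a[1]) for a, b in zip(seq, seq[1:])]
def pvDeltas (seq : List (Int × Int)) : List (Int × Int) :=
  (seq.zip seq.tail).map fun ab => (ab.2.1 - ab.1.1, ab.2.2 - ab.1.2)

def commandFunction_alt (start : Int × Int) (goal : Int × Int) (path : List (Int × Int)) : List (Int × Int) :=
  -- found = goal in p; seq = [start] + (p[:p.index(goal)+1] if found else p)
  let seq := start :: (if goal ∈ path then path.take (((PySem.List.index? path goal).getD 0) + 1) else path)
  let deltas := pvDeltas seq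
  (if goal ∈ path then deltas ++ [(0, 0)] else deltas).reverse

-- ===== PRECONDITION & SPEC =====
def Spec_commandFunction (start : Int × Int) (goal : Int × Int) (path : List (Int × Int)) (out : List (Int × Int)) : Prop := out = commandFunction_alt start goal path
instance (start : Int × Int) (goal : Int × Int) (path : List (Int × Int)) (out : List (Int × Int)) : Decidable (Spec_commandFunction start goal path out) := by unfold Spec_commandFunction; infer_instance

-- ===== CLAIM (what is proved, stated in full; the proofs are below) =====
def Claim_equal_commandFunction : Prop := ∀ (start : Int × Int) (goal : Int × Int) (path : List (Int × Int)), Dom_commandFunction start goal path → Spec_commandFunction start goal path (commandFunction start goal path)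

-- ===== LEMMAS AND PROOFS =====
lemma pvDeltas_cons_cons (a b : Int × Int) (t : List (Int × Int)) :
    pvDeltas (a :: b :: t) = (b.1 - a.1, b.2 - a.2) :: pvDeltas (b :: t) := rfl

lemma pvALoop_eq (goal : Int × Int) (path : List (Int × Int)) : ∀ (last : Int × Int),
    pvALoop goal last path =
      if goal ∈ path
      then pvDeltas (last :: path.take (((PySem.List.index? path goal).getD 0) + 1)) ++ [(0, 0)]
      else pvDeltas (last :: path) := by
  induction path with
  | nil => intro last; simp [pvALoop, pvDeltas]
  | cons pos rest ih =>
    intro last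
    by_cases hpg : pos = goal
    · subst hpg
      have h0 : List.idxOf? pos (pos :: rest) = some 0 := by
        simpa using PySem.List.index?_cons_self pos rest
      simp [pvALoop, h0, pvDeltas]
    · have hne : ¬ goal = pos := fun h => hpg h.symm
      by_cases hmem : goal ∈ rest
      · obtain ⟨i, hi⟩ := Option.isSome_iff_exists.mp
          ((PySem.List.index?_isSome_iff rest goal).mpr hmem)
        have hi' : List.idxOf? goal rest = some i := by
          simpa using hi
        have hcons : List.idxOf? goal (pos :: rest) = some (i + 1) := by
          have := PySem.List.index?_cons_of_ne rest hpg
          rw [hi] at this; simpa using this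
        simp [pvALoop, hpg, List.mem_cons, hne, hmem, hcons, hi', ih, pvDeltas_cons_cons,
          List.take_succ_cons]
      · simp [pvALoop, hpg, List.mem_cons, hne, hmem, ih, pvDeltas_cons_cons]

-- ===== VERDICT (by name: the statement is the Claim_ definition above) =====
theorem commandFunction_spec : Claim_equal_commandFunction := by
  intro start goal path _
  unfold Spec_commandFunction commandFunction commandFunction_alt
  rw [pvALoop_eq]
  by_cases h : goal ∈ path <;> simp [h]
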